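-- pv_equiv track=rewrite | github.com/ujin2021/study_algorithm | programmers-python/level2/solution9.py | solution
-- ===== SOURCE A (Python) =====
-- def solution(name):
--     answer = 0
--     n = len(name)
--     for i in range(n) :
--         c = name[i]
--         if (c == 'A') :
--             if(i <= n // 2 and i+1 >= n // 2) :
--                 answer -= 1
--             else :
--                 pass
--         if (ord(c) - 65 > 91 - ord(c)) :
--             answer += 91 - ord(c)
--         else :
--             answer += ord(c) - 65
--     return answer + len(name) - 1
-- ===== SOURCE B (Python) =====
-- def solution(name):
--     n = len(name)
--     counts = {}
--     for c in name:
--         counts[c] = counts.get(c, 0) + 1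
--     total = n - 1
--     for ch, cnt in counts.items():
--         total += cnt * (13 - abs(ord(ch) - 78))
--     for idx in (n // 2 - 1, n // 2):
--         if 0 <= idx < n and name[idx] == 'A':
--             total -= 1
--     return total
-- ===== Notes on version B (the rewrite author's own statement) =====
-- stated objective: alternative
-- what changed: Aggregates by distinct character via a frequency dict and weights each distinct character once with the closed form 13-abs(ord(ch)-78) (replacing A's per-index loop with a min-branch and an in-loop positional test), handling the middle-character adjustment by two constant-index lookups at n//2-1 and n//2.
import Mathlib
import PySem

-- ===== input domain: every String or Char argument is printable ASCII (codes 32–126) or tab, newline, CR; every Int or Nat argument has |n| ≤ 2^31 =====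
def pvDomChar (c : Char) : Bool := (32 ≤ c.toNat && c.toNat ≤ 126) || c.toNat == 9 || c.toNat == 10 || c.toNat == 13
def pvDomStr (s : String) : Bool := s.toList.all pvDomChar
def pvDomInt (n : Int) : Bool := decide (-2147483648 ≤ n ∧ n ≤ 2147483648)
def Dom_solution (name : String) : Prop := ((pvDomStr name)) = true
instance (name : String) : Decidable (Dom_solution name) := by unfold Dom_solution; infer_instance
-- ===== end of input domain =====

-- B aggregates by distinct character with a frequency dict and the closed form 13-|ord-78|,
-- and checks the middle-'A' adjustment by two constant-index lookups (alternative decomposition, same cost).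

-- ===== PORT A =====
-- loop 'for i in range(n): c = name[i]; …' ported as a fold over list(enumerate(name))
def solution (name : String) : Int :=
  let n : Int := (name.toList.length : Int)
  let answer : Int :=
    (PySem.List.enumerate name.toList 0).foldl (fun answer ic =>
      let i := ic.1
      let c := ic.2
      let answer :=
        if c = 'A' then
          (if i ≤ PySem.Int.floordiv n 2 ∧ i + 1 ≥ PySem.Int.floordiv n 2 then answer - 1 else answer)
        else answer
      if (c.toNat : Int) - 65 > 91 - (c.toNat : Int) then answer + (91 - (c.toNat : Int))
      else answer + ((c.toNat : Int) - 65)) 0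
  answer + n - 1

-- ===== PORT B =====
def solution_alt (name : String) : Int :=
  let n : Int := (name.toList.length : Int)
  let counts : PySem.Dict Char Int :=
    name.toList.foldl (fun d c => d.insert c (d.getD c 0 + 1)) PySem.Dict.empty
  let total : Int := n - 1
  let total : Int :=
    counts.items.foldl (fun t p => t + p.2 * (13 - |(p.1.toNat : Int) - 78|)) total
  let total : Int :=
    [PySem.Int.floordiv n 2 - 1, PySem.Int.floordiv n 2].foldl (fun t idx =>
      if 0 ≤ idx ∧ idx < n ∧ PySem.Str.pyGet? name idx = some 'A' then t - 1 else t) total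
  total

-- ===== PRECONDITION & SPEC =====
def Spec_solution (name : String) (out : Int) : Prop := out = solution_alt name
instance (name : String) (out : Int) : Decidable (Spec_solution name out) := by unfold Spec_solution; infer_instance

-- ===== CLAIM (what is proved, stated in full; the proofs are below) =====
def Claim_equal_solution : Prop := ∀ (name : String), Dom_solution name → Spec_solution name (solution name)

-- ===== LEMMAS AND PROOFS =====

-- single-index indicator sum over an enumerate
theorem pv_ind_sum (l : List Char) (s t : Int) :
    ((PySem.List.enumerate l s).map (fun p => if p.2 = 'A' ∧ p.1 = t then (-1 : Int) else 0)).sum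
      = if s ≤ t ∧ t < s + l.length ∧ l[(t - s).toNat]? = some 'A' then (-1 : Int) else 0 := by
  induction l generalizing s with
  | nil => simp
  | cons c cs ih =>
    rw [PySem.List.enumerate_cons, List.map_cons, List.sum_cons, ih (s + 1)]
    by_cases hts : t = s
    · have htail : ¬ (s + 1 ≤ t ∧ t < s + 1 + (cs.length : Int) ∧ cs[(t - (s + 1)).toNat]? = some 'A') := by
        intro h; omega
      have hz : (t - s).toNat = 0 := by omega
      rw [if_neg htail, add_zero, hz, List.getElem?_cons_zero]
      by_cases hc : c = 'A'
      · subst hc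
        rw [if_pos ⟨rfl, hts.symm⟩, if_pos ⟨by omega, by simp; omega, rfl⟩]
      · rw [if_neg (fun h => hc h.1), if_neg (fun h => hc (Option.some.inj h.2.2))]
    · have hhead : ¬ (c = 'A' ∧ s = t) := fun h => hts h.2.symm
      rw [if_neg hhead, zero_add]
      have hiff : (s + 1 ≤ t ∧ t < s + 1 + (cs.length : Int) ∧ cs[(t - (s + 1)).toNat]? = some 'A')
          ↔ (s ≤ t ∧ t < s + (((c :: cs).length : Nat) : Int) ∧ (c :: cs)[(t - s).toNat]? = some 'A') := by
        have hlen : (((c :: cs).length : Nat) : Int) = (cs.length : Int) + 1 := by simp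
        constructor
        · rintro ⟨h1, h2, h3⟩
          refine ⟨by omega, by omega, ?_⟩
          have hsk : (t - s).toNat = (t - (s + 1)).toNat + 1 := by omega
          rw [hsk, List.getElem?_cons_succ]; exact h3
        · rintro ⟨h1, h2, h3⟩
          refine ⟨by omega, by omega, ?_⟩
          have hsk : (t - s).toNat = (t - (s + 1)).toNat + 1 := by omega
          rw [hsk, List.getElem?_cons_succ] at h3; exact h3
      rw [if_congr hiff rfl rfl]

-- A's fold, for an arbitrary middle value m, equals the closed-form sum plus two indicators
theorem pv_fold_eq (l : List Char) (m : Int) :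
    ((PySem.List.enumerate l 0).foldl (fun answer ic =>
        let i := ic.1
        let c := ic.2
        let answer := if c = 'A' then (if i ≤ m ∧ i + 1 ≥ m then answer - 1 else answer) else answer
        if (c.toNat : Int) - 65 > 91 - (c.toNat : Int) then answer + (91 - (c.toNat : Int))
        else answer + ((c.toNat : Int) - 65)) 0)
      = (l.map (fun c => 13 - |(c.toNat : Int) - 78|)).sum
        + ((if 0 ≤ m - 1 ∧ m - 1 < (l.length : Int) ∧ l[(m - 1).toNat]? = some 'A' then (-1 : Int) else 0)
           + (if 0 ≤ m ∧ m < (l.length : Int) ∧ l[m.toNat]? = some 'A' then (-1 : Int) else 0)) := by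
  have hstep : (fun (answer : Int) (ic : Int × Char) =>
        let i := ic.1
        let c := ic.2
        let answer := if c = 'A' then (if i ≤ m ∧ i + 1 ≥ m then answer - 1 else answer) else answer
        if (c.toNat : Int) - 65 > 91 - (c.toNat : Int) then answer + (91 - (c.toNat : Int))
        else answer + ((c.toNat : Int) - 65))
      = (fun (a : Int) (p : Int × Char) => a +
          ((13 - |(p.2.toNat : Int) - 78|)
           + ((if p.2 = 'A' ∧ p.1 = m - 1 then (-1 : Int) else 0)
              + (if p.2 = 'A' ∧ p.1 = m then (-1 : Int) else 0)))) := by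
    funext a p
    obtain ⟨i, c⟩ := p
    dsimp only
    by_cases hA : c = 'A'
    · have hc : (c.toNat : Int) = 65 := by rw [hA]; decide
      rw [if_congr (and_iff_right hA) (Eq.refl (-1 : Int)) (Eq.refl (0 : Int)),
          if_congr (and_iff_right hA) (Eq.refl (-1 : Int)) (Eq.refl (0 : Int)), if_pos hA,
          abs_of_nonpos (by omega : (c.toNat : Int) - 78 ≤ 0)]
      split_ifs <;> omega
    · rw [if_neg (fun h : c = 'A' ∧ i = m - 1 => hA h.1),
          if_neg (fun h : c = 'A' ∧ i = m => hA h.1), if_neg hA]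
      rcases abs_cases ((c.toNat : Int) - 78) with ⟨habs, _⟩ | ⟨habs, _⟩ <;> rw [habs] <;>
        split_ifs <;> omega
  rw [hstep, PySem.List.foldl_add, PySem.List.sum_map_add_int, PySem.List.sum_map_add_int]
  have hcosts : ((PySem.List.enumerate l 0).map
      (fun p => 13 - |(p.2.toNat : Int) - 78|)).sum
      = (l.map (fun c => 13 - |(c.toNat : Int) - 78|)).sum := by
    conv_rhs => rw [← PySem.List.map_snd_enumerate l 0]
    rw [List.map_map]
    rfl
  rw [hcosts, pv_ind_sum l 0 (m - 1), pv_ind_sum l 0 m]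
  simp only [zero_add, sub_zero]

-- summing count k * g k over the distinct characters equals summing g over the list
theorem pv_count_sum (l : List Char) (g : Char → Int) :
    ((PySem.Set.ofList l).map (fun k => (l.count k : Int) * g k)).sum = (l.map g).sum := by
  have hfin : (PySem.Set.ofList l).toFinset = l.toFinset := by
    ext x
    simp [PySem.Set.mem_ofList]
  rw [← List.sum_toFinset _ (PySem.Set.nodup_ofList l), hfin,
      Finset.sum_list_map_count l g]
  refine Finset.sum_congr rfl (fun x _ => ?_)
  simp

theorem solution_eq_alt (name : String) : solution name = solution_alt name := by
  show ((PySem.List.enumerate name.toList 0).foldl (fun answer ic =>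
      let i := ic.1
      let c := ic.2
      let answer := if c = 'A' then
        (if i ≤ PySem.Int.floordiv (name.toList.length : Int) 2 ∧
            i + 1 ≥ PySem.Int.floordiv (name.toList.length : Int) 2 then answer - 1 else answer)
        else answer
      if (c.toNat : Int) - 65 > 91 - (c.toNat : Int) then answer + (91 - (c.toNat : Int))
      else answer + ((c.toNat : Int) - 65)) 0) + (name.toList.length : Int) - 1
    = ([PySem.Int.floordiv (name.toList.length : Int) 2 - 1,
        PySem.Int.floordiv (name.toList.length : Int) 2].foldl (fun t idx =>
        if 0 ≤ idx ∧ idx < (name.toList.length : Int) ∧ PySem.Str.pyGet? name idx = some 'A'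
        then t - 1 else t)
        ((name.toList.foldl (fun d c => d.insert c (d.getD c 0 + 1)) PySem.Dict.empty).items.foldl
          (fun t p => t + p.2 * (13 - |(p.1.toNat : Int) - 78|)) ((name.toList.length : Int) - 1)))
  rw [pv_fold_eq name.toList (PySem.Int.floordiv (name.toList.length : Int) 2),
      PySem.Dict.foldl_insert_getD_add_one_eq_counter, PySem.List.foldl_add,
      PySem.Dict.items_counter, List.map_map]
  have hsum : ((PySem.Set.ofList name.toList).map
      ((fun p : Char × Int => p.2 * (13 - |(p.1.toNat : Int) - 78|)) ∘
        (fun k => (k, (name.toList.count k : Int))))).sum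
      = (name.toList.map (fun c => 13 - |(c.toNat : Int) - 78|)).sum :=
    pv_count_sum name.toList (fun c => 13 - |(c.toNat : Int) - 78|)
  rw [hsum]
  have hget : ∀ t : Int, 0 ≤ t → PySem.Str.pyGet? name t = name.toList[t.toNat]? := by
    intro t ht
    rw [show PySem.Str.pyGet? name t = PySem.List.pyGet? name.toList t from rfl,
       PySem.List.pyGet?_of_nonneg _ ht]
  set l := name.toList with hl
  set m : Int := PySem.Int.floordiv (l.length : Int) 2 with hm
  simp only [List.foldl_cons, List.foldl_nil]
  have hb1 : (0 ≤ m - 1 ∧ m - 1 < (l.length : Int) ∧ PySem.Str.pyGet? name (m - 1) = some 'A')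
      ↔ (0 ≤ m - 1 ∧ m - 1 < (l.length : Int) ∧ l[(m - 1).toNat]? = some 'A') := by
    constructor <;> rintro ⟨h1, h2, h3⟩ <;> refine ⟨h1, h2, ?_⟩
    · rw [← hget _ h1]; exact h3
    · rw [hget _ h1]; exact h3
  have hb2 : (0 ≤ m ∧ m < (l.length : Int) ∧ PySem.Str.pyGet? name m = some 'A')
      ↔ (0 ≤ m ∧ m < (l.length : Int) ∧ l[m.toNat]? = some 'A') := by
    constructor <;> rintro ⟨h1, h2, h3⟩ <;> refine ⟨h1, h2, ?_⟩
    · rw [← hget _ h1]; exact h3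
    · rw [hget _ h1]; exact h3
  rw [if_congr hb2 rfl rfl, if_congr hb1 rfl rfl]
  split_ifs <;> ring

-- ===== VERDICT (by name: the statement is the Claim_ definition above) =====
theorem solution_spec : Claim_equal_solution := by
  intro name _
  unfold Spec_solution
  exact solution_eq_alt name
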